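-- pv_equiv track=rewrite | github.com/nguyenlinhlinh/adventofcode-2024 | 12/solution2.py | findHorisontalSides
-- ===== SOURCE A (Python) =====
-- def findHorisontalSides(perimeter):
--     sides = []
--     horisontelMap = {}
--     for i in range(len(perimeter)):
--         (r, c) = perimeter[i]
--         if r in horisontelMap:
--             horisontelMap[r].append(c)
--         else:
--             horisontelMap[r] = [c]
--     for r, array in horisontelMap.items():
--         array.sort()
--         curr = 0
--         for i in range(len(array)):
--             if i == len(array) -1 or array[i + 1] - array[i] != 1:
--                 if (i + 1 - curr) > 1:
--                     sides.append([(r, c) for c in array[curr: i + 1]])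
--                 curr = i + 1
--     return sides
-- ===== SOURCE B (Python) =====
-- def findHorisontalSides(perimeter):
--     rows = {}
--     for r, c in perimeter:
--         rows.setdefault(r, set()).add(c)
--     sides = []
--     for r, cols in rows.items():
--         for start in sorted(c for c in cols if c - 1 not in cols):
--             c = start
--             while c + 1 in cols:
--                 c += 1
--             if c > start:
--                 sides.append([(r, x) for x in range(start, c + 1)])
--     return sides
-- ===== Notes on version B (the rewrite author's own statement) =====
-- stated objective: alternative
-- what changed: Replaces A's sort-then-adjacent-difference scan per row by hash-set neighbour expansion (the longest-consecutive-run technique): columns go into a per-row set, run starts are the columns whose left neighbour is absent, and each run is walked rightwards by set membership; only the run starts are sorted. Pre_ excludes perimeters with repeated points, an unspecified corner on which A's list-based scan and B's set-based grouping make different, equally defensible choices.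
import Mathlib
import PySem

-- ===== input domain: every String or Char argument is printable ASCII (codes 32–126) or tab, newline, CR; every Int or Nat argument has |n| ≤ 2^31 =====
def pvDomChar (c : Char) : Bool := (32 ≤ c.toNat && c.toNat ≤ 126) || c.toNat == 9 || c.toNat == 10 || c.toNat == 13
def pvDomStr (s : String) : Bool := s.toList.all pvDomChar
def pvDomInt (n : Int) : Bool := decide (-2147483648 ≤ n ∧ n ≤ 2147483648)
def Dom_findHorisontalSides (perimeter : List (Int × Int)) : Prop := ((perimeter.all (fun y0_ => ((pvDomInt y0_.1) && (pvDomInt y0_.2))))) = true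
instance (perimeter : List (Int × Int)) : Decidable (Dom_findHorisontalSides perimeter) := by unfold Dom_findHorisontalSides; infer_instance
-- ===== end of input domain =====

-- B replaces A's per-row sort-then-adjacent-difference scan by hash-set neighbour expansion
-- (run starts = columns whose left neighbour is absent; runs walked by set membership); alternative algorithm, same cost.

-- ===== PORT A =====
-- bucketing loop body: if r in map: map[r].append(c) else: map[r] = [c]
def bucketA (m : PySem.Dict Int (List Int)) (rc : Int × Int) : PySem.Dict Int (List Int) :=
  if m.contains rc.1 then m.modify rc.1 [] (· ++ [rc.2]) else m.insert rc.1 [rc.2]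

-- inner loop body over i; Python short-circuits `or`, so array[i+1] is never read when i = len-1
-- (here pyGetD's default 0 is value-irrelevant in that case: the first disjunct already decides)
def stepA (r : Int) (a : List Int) (st : List (List (Int × Int)) × Int) (i : Int) :
    List (List (Int × Int)) × Int :=
  if i == (a.length : Int) - 1 || !(PySem.List.pyGetD a (i + 1) 0 - PySem.List.pyGetD a i 0 == 1) then
    ((if i + 1 - st.2 > 1 then
        st.1 ++ [(PySem.List.slice a (some st.2) (some (i + 1))).map (fun c => (r, c))]
      else st.1), i + 1)
  else st

def findHorisontalSides (perimeter : List (Int × Int)) : List (List (Int × Int)) :=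
  ((PySem.List.pyRange 0 (perimeter.length : Int) 1).foldl
      (fun m i => bucketA m (PySem.List.pyGetD perimeter i (0, 0))) PySem.Dict.empty).items.foldl
    (fun sides p =>
      let a := PySem.List.sorted p.2 (fun x => x) false
      ((PySem.List.pyRange 0 (a.length : Int) 1).foldl (stepA p.1 a) (sides, 0)).1)
    []

-- ===== PORT B =====
-- the while loop `while c + 1 in cols: c += 1`; the fuel argument len(cols) only makes the
-- loop total: each iteration steps to a distinct member of cols, so it never runs out
def runEnd (cols : PySem.Set Int) : Nat → Int → Int
  | 0, c => c
  | fuel + 1, c => if PySem.Set.contains cols (c + 1) then runEnd cols fuel (c + 1) else c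

-- per-start loop body: expand the run rightwards, emit it if longer than one cell
def emitRow (r : Int) (cols : PySem.Set Int) (sides : List (List (Int × Int))) (start : Int) :
    List (List (Int × Int)) :=
  if runEnd cols cols.length start > start then
    sides ++ [(PySem.List.pyRange start (runEnd cols cols.length start + 1) 1).map (fun x => (r, x))]
  else sides

-- bucketing loop body: rows.setdefault(r, set()).add(c)
def bucketB (m : PySem.Dict Int (PySem.Set Int)) (rc : Int × Int) : PySem.Dict Int (PySem.Set Int) :=
  (m.setdefault rc.1 PySem.Set.empty).modify rc.1 PySem.Set.empty (fun s => PySem.Set.add s rc.2)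

def findHorisontalSides_alt (perimeter : List (Int × Int)) : List (List (Int × Int)) :=
  (perimeter.foldl bucketB PySem.Dict.empty).items.foldl (fun sides p =>
      (PySem.List.sorted (List.filter (fun c => !(PySem.Set.contains p.2 (c - 1))) p.2)
          (fun x => x) false).foldl (emitRow p.1 p.2) sides)
    []

-- ===== PRECONDITION & SPEC =====
-- Pre_ excludes perimeters with repeated points: what a repeated cell contributes is unspecified
-- (the perimeter is meant as a collection of distinct cells), and A's list-based scan and B's
-- set-based grouping make different, equally defensible choices there.
def Pre_findHorisontalSides (perimeter : List (Int × Int)) : Prop := perimeter.Nodup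
instance (perimeter : List (Int × Int)) : Decidable (Pre_findHorisontalSides perimeter) := by
  unfold Pre_findHorisontalSides; infer_instance

def pvWitness_findHorisontalSides : (List (Int × Int)) := [(0, 1), (0, 2), (1, 5), (0, 3)]

def Spec_findHorisontalSides (perimeter : List (Int × Int)) (out : List (List (Int × Int))) : Prop := out = findHorisontalSides_alt perimeter
instance (perimeter : List (Int × Int)) (out : List (List (Int × Int))) : Decidable (Spec_findHorisontalSides perimeter out) := by unfold Spec_findHorisontalSides; infer_instance

-- ===== CLAIM (what is proved, stated in full; the proofs are below) =====
def Claim_equal_findHorisontalSides : Prop := ∀ (perimeter : List (Int × Int)), Dom_findHorisontalSides perimeter → Pre_findHorisontalSides perimeter → Spec_findHorisontalSides perimeter (findHorisontalSides perimeter)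

-- ===== LEMMAS AND PROOFS =====

-- proof-side accumulator normal form of A's per-row scan: keep the current run, flush on gaps
def stepAcc (r : Int) (st : List (List (Int × Int)) × List Int) (c : Int) :
    List (List (Int × Int)) × List Int :=
  if !st.2.isEmpty && !(c - PySem.List.pyGetD st.2 (-1) 0 == 1) then
    ((if st.2.length > 1 then st.1 ++ [st.2.map (fun x => (r, x))] else st.1), [c])
  else (st.1, st.2 ++ [c])

def accFinish (r : Int) (s : List Int) (sides : List (List (Int × Int))) : List (List (Int × Int)) :=
  let st := s.foldl (stepAcc r) (sides, [])
  if st.2.length > 1 then st.1 ++ [st.2.map (fun x => (r, x))] else st.1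

-- A's index/curr scan equals the run-accumulator scan (invariant: the run is the slice a[curr:i])
lemma rowAux (r : Int) : ∀ (rest p run : List Int) (sides : List (List (Int × Int))), run ≠ [] →
    ((PySem.List.pyRange ((p.length + run.length - 1 : Nat) : Int)
        (((p ++ run ++ rest).length : Nat) : Int) 1).foldl
      (stepA r (p ++ run ++ rest)) (sides, (p.length : Int))).1
    = (let st := rest.foldl (stepAcc r) (sides, run)
       if st.2.length > 1 then st.1 ++ [st.2.map (fun x => (r, x))] else st.1) := by
  intro rest
  induction rest with
  | nil =>
    intro p run sides hrun
    have hR : 0 < run.length := List.length_pos_iff.mpr hrun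
    have hn : (((p ++ run ++ ([] : List Int)).length : Nat) : Int)
        = ((p.length + run.length - 1 : Nat) : Int) + 1 := by
      simp [List.length_append]
      push_cast [Nat.cast_sub (by omega : 1 ≤ p.length + run.length)]
      omega
    rw [hn, PySem.List.pyRange_one_singleton]
    simp only [List.foldl_cons, List.foldl_nil, stepA]
    rw [if_pos (by rw [hn]; simp)]
    have h2 : ((p.length + run.length - 1 : Nat) : Int) + 1 = ((p.length + run.length : Nat) : Int) := by
      push_cast [Nat.cast_sub (by omega : 1 ≤ p.length + run.length)]; ring
    rw [h2, PySem.List.slice_natCast]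
    simp only [List.append_nil, List.drop_left, Nat.add_sub_cancel_left, List.take_length]
    have hiff : (((p.length + run.length : Nat) : Int) - (p.length : Int) > 1) ↔ run.length > 1 := by
      push_cast; omega
    split_ifs with ha hb hc
    · rfl
    · exact absurd (hiff.mp ha) hb
    · exact absurd (hiff.mpr hc) ha
    · rfl
  | cons c rest ih =>
    intro p run sides hrun
    have hR : 0 < run.length := List.length_pos_iff.mpr hrun
    have h2 : ((p.length + run.length - 1 : Nat) : Int) + 1 = ((p.length + run.length : Nat) : Int) := by
      push_cast [Nat.cast_sub (by omega : 1 ≤ p.length + run.length)]; ring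
    have hlen : (p ++ run ++ c :: rest).length = p.length + run.length + rest.length + 1 := by
      simp [List.length_append]; omega
    have hi : ((p.length + run.length - 1 : Nat) : Int) < ((p ++ run ++ c :: rest).length : Int) := by
      rw [hlen]; push_cast [Nat.cast_sub (by omega : 1 ≤ p.length + run.length)]; omega
    rw [PySem.List.pyRange_one_cons hi]
    simp only [List.foldl_cons]
    have hgetc : PySem.List.pyGetD (p ++ run ++ c :: rest) (((p.length + run.length - 1 : Nat) : Int) + 1) 0 = c := by
      rw [h2, PySem.List.pyGetD_natCast]
      rw [List.getD_append_right _ _ _ _ (by simp)]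
      simp
    have hgetl : PySem.List.pyGetD (p ++ run ++ c :: rest) ((p.length + run.length - 1 : Nat) : Int) 0 = run.getLast hrun := by
      rw [PySem.List.pyGetD_natCast]
      rw [List.getD_append _ _ _ _ (by simp; omega)]
      rw [List.getD_append_right _ _ _ _ (by omega)]
      rw [List.getD_eq_getElem _ _ (by omega), List.getLast_eq_getElem]
      congr 1
      omega
    have hne : ((((p.length + run.length - 1 : Nat) : Int)) == ((p ++ run ++ c :: rest).length : Int) - 1) = false := by
      rw [hlen]
      simp only [beq_eq_false_iff_ne, ne_eq]
      push_cast [Nat.cast_sub (by omega : 1 ≤ p.length + run.length)]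
      omega
    simp only [stepA, hgetc, hgetl, hne, Bool.false_or]
    by_cases hgap : c - run.getLast hrun = 1
    · rw [if_neg (by simp [hgap])]
      have hstep : stepAcc r (sides, run) c = (sides, run ++ [c]) := by
        simp [stepAcc, PySem.List.pyGetD_neg_one run 0 hrun, hgap]
      rw [hstep, h2]
      have h3 := ih p (run ++ [c]) sides (by simp)
      rw [show (p.length + (run ++ [c]).length - 1 : Nat) = p.length + run.length by simp] at h3
      simpa [List.append_assoc] using h3
    · rw [if_pos (by simp [hgap])]
      have hslice : (PySem.List.slice (p ++ run ++ c :: rest) (some (p.length : Int))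
          (some (((p.length + run.length - 1 : Nat) : Int) + 1))) = run := by
        rw [h2, PySem.List.slice_natCast, List.append_assoc, List.drop_left,
          Nat.add_sub_cancel_left]
        simp
      rw [hslice]
      have hpair : (if ((p.length + run.length - 1 : Nat) : Int) + 1 - (p.length : Int) > 1 then
            sides ++ [List.map (fun c => (r, c)) run] else sides)
          = (if run.length > 1 then sides ++ [List.map (fun x => (r, x)) run] else sides) := by
        rw [h2]
        split_ifs with ha hb hc
        · rfl
        · exact absurd (by push_cast at ha; omega) hb
        · exact absurd (by push_cast; omega : ((p.length + run.length : Nat) : Int) - (p.length : Int) > 1) ha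
        · rfl
      rw [hpair, h2]
      have hstep : stepAcc r (sides, run) c
          = ((if run.length > 1 then sides ++ [List.map (fun x => (r, x)) run] else sides), [c]) := by
        simp [stepAcc, PySem.List.pyGetD_neg_one run 0 hrun, hgap, hrun]
      rw [hstep]
      have h3 := ih (p ++ run) [c]
        (if run.length > 1 then sides ++ [List.map (fun x => (r, x)) run] else sides) (by simp)
      rw [show ((p ++ run).length + [c].length - 1 : Nat) = p.length + run.length by simp] at h3
      simpa [List.append_assoc] using h3

lemma rowBody (r : Int) (a : List Int) (sides : List (List (Int × Int))) :
    ((PySem.List.pyRange 0 (a.length : Int) 1).foldl (stepA r a) (sides, 0)).1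
    = accFinish r a sides := by
  cases a with
  | nil => simp [PySem.List.pyRange_one_eq_nil, accFinish]
  | cons x t =>
    have h := rowAux r t [] [x] sides (by simp)
    simpa [stepAcc, accFinish] using h

-- ofList of a duplicate-free list is the list itself
lemma setUpdate_of_disjoint : ∀ (xs s : List Int), (∀ x ∈ xs, x ∉ s) → xs.Nodup →
    PySem.Set.update s xs = s ++ xs := by
  intro xs
  induction xs with
  | nil => intro s _ _; simp [PySem.Set.update]
  | cons x t ih =>
    intro s hd hn
    have hadd : PySem.Set.add s x = s ++ [x] := by
      have hx : x ∉ s := hd x (by simp)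
      have hc : s.contains x = false := by
        cases h : s.contains x
        · rfl
        · exact absurd (List.contains_iff_mem.mp h) hx
      simp [PySem.Set.add, hx]
    have := ih (s ++ [x]) (by
      intro y hy
      simp only [List.mem_append, List.mem_singleton]
      rintro (h | rfl)
      · exact hd y (by simp [hy]) h
      · exact (List.nodup_cons.mp hn).1 hy) (List.nodup_cons.mp hn).2
    simp only [PySem.Set.update, List.foldl_cons, hadd]
    simpa [PySem.Set.update] using this

lemma ofList_eq_self (L : List Int) (h : L.Nodup) : PySem.Set.ofList L = L := by
  have := setUpdate_of_disjoint L [] (by simp) h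
  simpa [PySem.Set.update, PySem.Set.ofList, PySem.Set.empty] using this

-- both bucketing bodies are a plain Dict.modify
lemma bucketA_eq (m : PySem.Dict Int (List Int)) (rc : Int × Int) :
    bucketA m rc = m.modify rc.1 [] (· ++ [rc.2]) := by
  unfold bucketA
  by_cases h : m.contains rc.1 = true
  · simp [h]
  · simp only [Bool.not_eq_true] at h
    have : m.getD rc.1 [] = [] := by
      rw [PySem.Dict.contains_eq_isSome_get?] at h
      rw [PySem.Dict.getD]
      cases hq : m.get? rc.1 with
      | none => rfl
      | some v => rw [hq] at h; simp at h
    simp [h, PySem.Dict.modify, this]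

lemma bucketB_eq (m : PySem.Dict Int (PySem.Set Int)) (rc : Int × Int) :
    bucketB m rc = m.modify rc.1 PySem.Set.empty (fun s => PySem.Set.add s rc.2) := by
  unfold bucketB
  by_cases h : m.contains rc.1 = true
  · rw [PySem.Dict.setdefault_of_contains m _ h]
  · simp only [Bool.not_eq_true] at h
    rw [PySem.Dict.setdefault_of_not_contains m _ h]
    have hg : m.getD rc.1 PySem.Set.empty = PySem.Set.empty := by
      rw [PySem.Dict.contains_eq_isSome_get?] at h
      rw [PySem.Dict.getD]
      cases hq : m.get? rc.1 with
      | none => rfl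
      | some v => rw [hq] at h; simp at h
    simp only [PySem.Dict.modify, PySem.Dict.getD_insert_self, PySem.Dict.insert_insert_self]
    rw [hg]

-- value of B's bucket dict: the set of that row's columns
lemma getD_foldl_modify_add : ∀ (l : List (Int × Int)) (d : PySem.Dict Int (PySem.Set Int)) (c : Int),
    (l.foldl (fun d p => d.modify p.1 PySem.Set.empty (fun s => PySem.Set.add s p.2)) d).getD c PySem.Set.empty
    = PySem.Set.update (d.getD c PySem.Set.empty) ((l.filter (fun p => p.1 == c)).map (·.2)) := by
  intro l
  induction l with
  | nil => intro d c; simp [PySem.Set.update]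
  | cons p t ih =>
    intro d c
    simp only [List.foldl_cons]
    rw [ih]
    by_cases h : p.1 = c
    · subst h
      rw [PySem.Dict.modify, PySem.Dict.getD_insert_self]
      simp [PySem.Set.update]
    · rw [PySem.Dict.modify, PySem.Dict.getD_insert_of_ne _ _ _ (Ne.symm h)]
      simp [h]

-- a duplicate-free perimeter has duplicate-free column lists per row
lemma colsNodup (P : List (Int × Int)) (h : P.Nodup) (c : Int) :
    ((P.filter (fun p => p.1 == c)).map (·.2)).Nodup := by
  apply List.Nodup.map_on
  · intro a ha b hb hab
    have ha1 : a.1 = c := by simpa using List.of_mem_filter ha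
    have hb1 : b.1 = c := by simpa using List.of_mem_filter hb
    exact Prod.ext (ha1.trans hb1.symm) hab
  · exact h.filter _

lemma contains_iff (cols : List Int) (x : Int) : PySem.Set.contains cols x = true ↔ x ∈ cols := by
  simp [PySem.Set.contains]

-- the while loop lands on the end of the consecutive block
lemma runEnd_eq (cols : List Int) : ∀ (fuel : Nat) (c e : Int), c ≤ e →
    (∀ x : Int, c < x → x ≤ e → x ∈ cols) → (e + 1) ∉ cols → (e - c).toNat ≤ fuel →
    runEnd cols fuel c = e := by
  intro fuel
  induction fuel with
  | zero =>
    intro c e h1 _ _ hf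
    have : c = e := by omega
    simp [runEnd, this]
  | succ fuel ih =>
    intro c e h1 h2 h3 hf
    by_cases hce : c = e
    · subst hce
      have : PySem.Set.contains cols (c + 1) = false := by
        cases h : PySem.Set.contains cols (c + 1)
        · rfl
        · exact absurd ((contains_iff cols (c+1)).mp h) h3
      have hni : ¬ (PySem.Set.contains cols (c + 1) = true) := by
        rw [contains_iff]; exact h3
      simp only [runEnd]
      rw [if_neg hni]
    · have hlt : c < e := lt_of_le_of_ne h1 hce
      have hmem : (c + 1) ∈ cols := h2 (c + 1) (by omega) (by omega)
      rw [runEnd, if_pos ((contains_iff cols (c+1)).mpr hmem)]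
      exact ih (c + 1) e (by omega) (fun x hx1 hx2 => h2 x (by omega) hx2) h3 (by omega)

lemma runEnd_spec (cols : List Int) (_hnd : cols.Nodup) (c e : Int) (h1 : c ≤ e)
    (h2 : ∀ x : Int, c < x → x ≤ e → x ∈ cols) (h3 : (e + 1) ∉ cols) :
    runEnd cols cols.length c = e := by
  apply runEnd_eq cols _ c e h1 h2 h3
  have hsub : (PySem.List.pyRange (c + 1) (e + 1) 1).Subperm cols := by
    apply List.subperm_of_subset (PySem.List.nodup_pyRange_one _ _)
    intro x hx
    rw [PySem.List.mem_pyRange_one] at hx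
    exact h2 x (by omega) (by omega)
  have := hsub.length_le
  rw [PySem.List.length_pyRange_one] at this
  omega

-- emitting one start whose maximal run is the block [x, x+n)
lemma emit_block (r : Int) (cols : List Int) (hnd : cols.Nodup) (x : Int) (n : Nat) (hn : 1 ≤ n)
    (hmem : ∀ z : Int, x < z → z < x + (n : Int) → z ∈ cols) (hnot : (x + (n : Int)) ∉ cols)
    (sides : List (List (Int × Int))) :
    emitRow r cols sides x
    = if 1 < n then sides ++ [(PySem.List.pyRange x (x + (n : Int)) 1).map (fun z => (r, z))]
      else sides := by
  have he : runEnd cols cols.length x = x + (n : Int) - 1 := by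
    apply runEnd_spec cols hnd _ _ (by omega)
    · intro z hz1 hz2
      exact hmem z hz1 (by omega)
    · simpa using hnot
  unfold emitRow
  rw [he]
  have hiff : (x + (n : Int) - 1 > x) ↔ 1 < n := by omega
  split_ifs with ha hb hc
  · rw [show x + (n : Int) - 1 + 1 = x + (n : Int) by ring]
  · exact absurd (hiff.mp ha) hb
  · exact absurd (hiff.mpr hc) ha
  · rfl

-- a strictly increasing list starts with a maximal consecutive block
lemma block_decomp : ∀ (t0 : List Int) (x : Int), (x :: t0).Pairwise (· < ·) →
    ∃ (n : Nat) (t' : List Int), 1 ≤ n ∧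
      x :: t0 = PySem.List.pyRange x (x + (n : Int)) 1 ++ t' ∧
      (∀ y ∈ t', x + (n : Int) < y) ∧ t'.length + n = t0.length + 1 := by
  intro t0
  induction t0 with
  | nil =>
    intro x _
    exact ⟨1, [], le_refl 1, by simp [PySem.List.pyRange_one_singleton], by simp, by simp⟩
  | cons y t ih =>
    intro x hp
    have hxy : x < y := (List.pairwise_cons.mp hp).1 y (by simp)
    by_cases hy : y = x + 1
    · obtain ⟨n, t', hn, heq, hgt, hlen⟩ := ih y (List.pairwise_cons.mp hp).2
      refine ⟨n + 1, t', by omega, ?_, ?_, ?_⟩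
      · rw [PySem.List.pyRange_one_cons (by push_cast; omega)]
        push_cast
        rw [show x + ((n : Int) + 1) = (x + 1) + (n : Int) by ring, ← hy, List.cons_append, ← heq]
      · intro z hz
        have := hgt z hz
        omega
      · simp at hlen ⊢; omega
    · refine ⟨1, y :: t, le_refl 1, by simp [PySem.List.pyRange_one_singleton], ?_, by simp⟩
      intro z hz
      rcases List.mem_cons.mp hz with rfl | hz'
      · omega
      · have := (List.pairwise_cons.mp (List.pairwise_cons.mp hp).2).1 z hz'
        have := (List.pairwise_cons.mp hp).1 z (by simp [hz'])
        omega

-- the accumulator absorbs a consecutive block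
lemma acc_run (r : Int) : ∀ (n : Nat) (x : Int) (run : List Int) (sides : List (List (Int × Int)))
    (hrun : run ≠ []), run.getLast hrun = x - 1 →
    (PySem.List.pyRange x (x + (n : Int)) 1).foldl (stepAcc r) (sides, run)
    = (sides, run ++ PySem.List.pyRange x (x + (n : Int)) 1) := by
  intro n
  induction n with
  | zero => intro x run sides hrun _; simp [PySem.List.pyRange_one_eq_nil]
  | succ n ih =>
    intro x run sides hrun hlast
    rw [PySem.List.pyRange_one_cons (a := x) (b := x + ((n + 1 : Nat) : Int)) (by omega)]
    simp only [List.foldl_cons]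
    have hstep : stepAcc r (sides, run) x = (sides, run ++ [x]) := by
      have : x - PySem.List.pyGetD run (-1) 0 = 1 := by
        rw [PySem.List.pyGetD_neg_one run 0 hrun, hlast]; ring
      simp [stepAcc, this]
    rw [hstep]
    have h2 : x + (((n + 1 : Nat) : Nat) : Int) = (x + 1) + (n : Int) := by omega
    rw [h2]
    rw [ih (x + 1) (run ++ [x]) sides (by simp) (by rw [List.getLast_concat]; ring)]
    simp

lemma acc_block (r : Int) (n : Nat) (hn : 1 ≤ n) (x : Int) (sides : List (List (Int × Int))) :
    (PySem.List.pyRange x (x + (n : Int)) 1).foldl (stepAcc r) (sides, [])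
    = (sides, PySem.List.pyRange x (x + (n : Int)) 1) := by
  rw [PySem.List.pyRange_one_cons (by omega)]
  simp only [List.foldl_cons]
  have hstep : stepAcc r (sides, []) x = (sides, [x]) := by simp [stepAcc]
  rw [hstep]
  have h3 : x + (n : Int) = (x + 1) + ((n - 1 : Nat) : Int) := by omega
  rw [h3, acc_run r (n-1) (x+1) [x] sides (by simp) (by simp)]
  simp

-- a block filters down to its start
lemma filter_block (q : Int → Bool) (x : Int) (n : Nat) (hn : 1 ≤ n) (hx : q x = true)
    (hrest : ∀ z : Int, x < z → z < x + (n : Int) → q z = false) :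
    (PySem.List.pyRange x (x + (n : Int)) 1).filter q = [x] := by
  rw [PySem.List.pyRange_one_cons (by omega)]
  rw [List.filter_cons_of_pos hx]
  rw [List.filter_eq_nil_iff.mpr]
  intro z hz
  rw [PySem.List.mem_pyRange_one] at hz
  simp [hrest z (by omega) (by omega)]

-- MAIN per-row lemma: the gap scan and the start-expansion emit the same sides, in order
lemma main_row (r : Int) : ∀ (N : Nat) (t cols : List Int) (lb : Int)
    (sides : List (List (Int × Int))), t.length ≤ N → t.Pairwise (· < ·) → cols.Nodup →
    (∀ z ∈ t, lb ≤ z) → (∀ z : Int, lb - 1 ≤ z → (z ∈ cols ↔ z ∈ t)) →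
    accFinish r t sides
    = (t.filter (fun c => !(PySem.Set.contains cols (c - 1)))).foldl (emitRow r cols) sides := by
  intro N
  induction N with
  | zero =>
    intro t cols lb sides hN _ _ _ _
    have : t = [] := List.length_eq_zero_iff.mp (Nat.le_zero.mp hN)
    subst this
    simp [accFinish]
  | succ N ih =>
    intro t cols lb sides hN hp hnd hbound hagree
    cases t with
    | nil => simp [accFinish]
    | cons x t0 =>
      obtain ⟨n, t', hn, heq, hgt, hlen⟩ := block_decomp t0 x hp
      -- abbreviations
      set R := PySem.List.pyRange x (x + (n : Int)) 1 with hR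
      have hRlen : R.length = n := by
        rw [hR, PySem.List.length_pyRange_one]; omega
      have hRmem : ∀ z : Int, z ∈ R ↔ x ≤ z ∧ z < x + (n : Int) := by
        intro z; rw [hR]; exact PySem.List.mem_pyRange_one
      have hxlb : lb ≤ x := hbound x (by simp)
      -- membership of t in terms of blocks
      have htmem : ∀ z : Int, z ∈ x :: t0 ↔ (z ∈ R ∨ z ∈ t') := by
        intro z; rw [heq]; simp
      -- the filter over the block is [x]
      have hq_x : (!(PySem.Set.contains cols (x - 1))) = true := by
        have : (x - 1) ∉ cols := by
          intro hc
          have := (hagree (x - 1) (by omega)).mp hc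
          rcases (htmem (x-1)).mp this with h | h
          · have := (hRmem _).mp h; omega
          · have := hgt _ h; omega
        simp [PySem.Set.contains, this]
      have hq_rest : ∀ z : Int, x < z → z < x + (n : Int) → (!(PySem.Set.contains cols (z - 1))) = false := by
        intro z h1 h2
        have hz1 : (z - 1) ∈ cols := by
          apply (hagree (z - 1) (by omega)).mpr
          apply (htmem (z-1)).mpr
          left; rw [hRmem]; omega
        simp [PySem.Set.contains, hz1]
      have hfilt : (x :: t0).filter (fun c => !(PySem.Set.contains cols (c - 1)))
          = x :: t'.filter (fun c => !(PySem.Set.contains cols (c - 1))) := by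
        rw [heq, List.filter_append, filter_block _ x n hn hq_x hq_rest]
        simp
      -- the emitted side for the head block
      have hemit : emitRow r cols sides x
          = if 1 < n then sides ++ [R.map (fun z => (r, z))] else sides := by
        apply emit_block r cols hnd x n hn
        · intro z h1 h2
          apply (hagree z (by omega)).mpr
          apply (htmem z).mpr
          left; rw [hRmem]; omega
        · intro hc
          have := (hagree (x + n) (by omega)).mp hc
          rcases (htmem _).mp this with h | h
          · have := (hRmem _).mp h; omega
          · have := hgt _ h; omega
      -- flush value
      set flushSides := if 1 < n then sides ++ [R.map (fun z => (r, z))] else sides with hflush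
      -- pairwise facts
      have hp' : t'.Pairwise (· < ·) := by
        have hsub : t'.Sublist (x :: t0) := by rw [heq]; exact List.sublist_append_right _ _
        exact List.Pairwise.sublist hsub hp
      -- LHS decomposition
      have hfold : (x :: t0).foldl (stepAcc r) (sides, []) = t'.foldl (stepAcc r) (sides, R) := by
        rw [heq, List.foldl_append, acc_block r n hn x sides]
      have hlhs : accFinish r (x :: t0) sides = accFinish r t' flushSides := by
        cases ht' : t' with
        | nil =>
          subst ht'
          unfold accFinish
          rw [hfold]
          simp only [List.foldl_nil]
          simp [hRlen, hflush]
        | cons y t'' =>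
          unfold accFinish
          rw [hfold, ht']
          simp only [List.foldl_cons]
          have hRne : R ≠ [] := by
            intro h; rw [h] at hRlen; simp at hRlen; omega
          have hylast : y - PySem.List.pyGetD R (-1) 0 ≠ 1 := by
            have hlast : R.getLast hRne = x + (n : Int) - 1 := by
              have h5 : R = PySem.List.pyRange x (x + (n:Int) - 1) 1 ++ [x + (n:Int) - 1] := by
                rw [hR, show x + (n:Int) = (x + (n:Int) - 1) + 1 by ring,
                  PySem.List.pyRange_one_succ_right (by omega)]
                norm_num
              have h6 : R.getLast? = some (x + (n:Int) - 1) := by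
                rw [h5, List.getLast?_concat]
              have h7 := List.getLast?_eq_some_getLast hRne
              exact Option.some.inj (h7.symm.trans h6)
            rw [PySem.List.pyGetD_neg_one R 0 hRne, hlast]
            have : x + (n : Int) < y := hgt y (by rw [ht']; simp)
            omega
          have hstep1 : stepAcc r (sides, R) y = (flushSides, [y]) := by
            have hcond : (!(R.isEmpty) && !(y - PySem.List.pyGetD R (-1) 0 == 1)) = true := by
              simp [hRne, hylast]
            simp only [stepAcc, hcond]
            simp [hflush, hRlen]
          have hstep2 : stepAcc r (flushSides, []) y = (flushSides, [y]) := by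
            simp [stepAcc]
          rw [hstep1, hstep2]
      rw [hlhs, hfilt]
      simp only [List.foldl_cons]
      rw [hemit]
      -- IH on t'
      apply ih t' cols (x + (n : Int) + 1) flushSides
      · have : (x :: t0).length = t0.length + 1 := by simp
        omega
      · exact hp'
      · exact hnd
      · intro z hz; have := hgt z hz; omega
      · intro z hz
        rw [hagree z (by omega), htmem z]
        constructor
        · rintro (h | h)
          · exfalso; have := (hRmem z).mp h; omega
          · exact h
        · intro h; right; exact h

-- one full row: A's scan of the sorted column list = B's expansion over the column set
lemma perRow (r : Int) (L : List Int) (hL : L.Nodup) (sides : List (List (Int × Int))) :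
    (let a := PySem.List.sorted L (fun x => x) false
     ((PySem.List.pyRange 0 (a.length : Int) 1).foldl (stepA r a) (sides, 0)).1)
    = (PySem.List.sorted
        (List.filter (fun c => !(PySem.Set.contains (PySem.Set.ofList L) (c - 1))) (PySem.Set.ofList L))
        (fun x => x) false).foldl (emitRow r (PySem.Set.ofList L)) sides := by
  rw [ofList_eq_self L hL]
  show ((PySem.List.pyRange 0 ((PySem.List.sorted L (fun x => x) false).length : Int) 1).foldl
      (stepA r (PySem.List.sorted L (fun x => x) false)) (sides, 0)).1 = _
  rw [rowBody]
  have hperm : (PySem.List.sorted L (fun x => x) false).Perm L :=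
    PySem.List.sorted_perm L (fun x => x) false
  set s := PySem.List.sorted L (fun x => x) false with hs
  have hnod : s.Nodup := hperm.nodup_iff.mpr hL
  have hle : s.Pairwise (fun a b => a ≤ b) := PySem.List.sorted_pairwise L (fun x => x)
  have hlt : s.Pairwise (· < ·) := by
    have hand := List.Pairwise.and hle hnod
    exact hand.imp (fun h => lt_of_le_of_ne h.1 h.2)
  have hfs : PySem.List.sorted
      (List.filter (fun c => !(PySem.Set.contains L (c - 1))) L) (fun x => x) false
      = s.filter (fun c => !(PySem.Set.contains L (c - 1))) := by
    apply PySem.List.sorted_eq_of_perm_of_pairwise_lt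
    · exact List.Perm.filter _ hperm
    · exact List.Pairwise.sublist List.filter_sublist hlt
  rw [hfs]
  cases hcase : s with
  | nil => simp [accFinish]
  | cons x t0 =>
    rw [← hcase]
    apply main_row r s.length s L x sides (le_refl _) hlt hL
    · intro z hz
      rw [hcase] at hz hlt
      rcases List.mem_cons.mp hz with rfl | hz'
      · exact le_refl _
      · exact le_of_lt ((List.pairwise_cons.mp hlt).1 z hz')
    · intro z _
      exact (hperm.mem_iff (a := z)).symm

-- ===== VERDICT (by name: the statement is the Claim_ definition above) =====
theorem findHorisontalSides_spec : Claim_equal_findHorisontalSides := by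
  intro P _ hpre
  unfold Spec_findHorisontalSides findHorisontalSides findHorisontalSides_alt
  rw [PySem.List.foldl_pyRange_zero_pyGetD' P ((0 : Int), (0 : Int)) bucketA PySem.Dict.empty]
  rw [show bucketA = (fun m rc => m.modify rc.1 [] (· ++ [rc.2])) from
    funext fun m => funext fun rc => bucketA_eq m rc]
  rw [show bucketB = (fun m rc => m.modify rc.1 PySem.Set.empty (fun s => PySem.Set.add s rc.2)) from
    funext fun m => funext fun rc => bucketB_eq m rc]
  set dA := P.foldl (fun d p => d.modify p.1 [] (· ++ [p.2])) PySem.Dict.empty with hdA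
  set dB := P.foldl (fun d p => d.modify p.1 PySem.Set.empty (fun s => PySem.Set.add s p.2))
    PySem.Dict.empty with hdB
  have hkA : dA.keys = PySem.Set.ofList (P.map (·.1)) := by
    rw [hdA, PySem.Dict.keys_foldl_modify_key P (·.1) [] (fun _ p => (· ++ [p.2])) PySem.Dict.empty]
    rfl
  have hkB : dB.keys = PySem.Set.ofList (P.map (·.1)) := by
    rw [hdB, PySem.Dict.keys_foldl_modify_key P (·.1) PySem.Set.empty
      (fun _ p => (fun s => PySem.Set.add s p.2)) PySem.Dict.empty]
    rfl
  have hnkA : dA.keys.Nodup := by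
    rw [hdA]
    exact PySem.Dict.nodup_keys_foldl_modify_key P (·.1) [] (fun _ p => (· ++ [p.2]))
      PySem.Dict.empty (by simp [PySem.Dict.keys, PySem.Dict.empty])
  have hnkB : dB.keys.Nodup := by
    rw [hdB]
    exact PySem.Dict.nodup_keys_foldl_modify_key P (·.1) PySem.Set.empty
      (fun _ p => (fun s => PySem.Set.add s p.2)) PySem.Dict.empty (by simp [PySem.Dict.keys, PySem.Dict.empty])
  rw [PySem.Dict.items_eq_map_keys dA hnkA [], PySem.Dict.items_eq_map_keys dB hnkB PySem.Set.empty,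
    List.foldl_map, List.foldl_map, hkA, hkB]
  apply PySem.List.foldl_congr_mem
  intro sides k _
  have hvA : dA.getD k [] = (P.filter (fun p => p.1 == k)).map (·.2) := by
    rw [hdA, PySem.Dict.getD_foldl_modify_append]
    rfl
  have hvB : dB.getD k PySem.Set.empty
      = PySem.Set.ofList ((P.filter (fun p => p.1 == k)).map (·.2)) := by
    rw [hdB, getD_foldl_modify_add]
    rfl
  simp only [hvA, hvB]
  exact perRow k ((P.filter (fun p => p.1 == k)).map (·.2)) (colsNodup P hpre k) sides
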